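-- pv_equiv track=rewrite | github.com/gschramm/advent_of_code | 2024/07/07a.py | possible_results
-- ===== SOURCE A (Python) =====
-- def reduce_list(x):
--     xx = x.copy()
--
--     a = xx.pop(0)
--     xx2 = xx.copy()
--
--     xx[0] += a
--     xx2[0] *= a
--
--     return [xx, xx2]
--
-- def possible_results(x):
--     res = reduce_list(x)
--
--     i = 1
--     while len(res[0]) > 1:
--         tmp = [reduce_list(z) for z in res]
--         res = []
--         for j in range(2**i):
--             res.append(tmp[j][0])
--             res.append(tmp[j][1])
--         i += 1
--
--     res = [item for sublist in res for item in sublist]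
--
--     return res
-- ===== SOURCE B (Python) =====
-- def possible_results(x):
--     if len(x) == 2:
--         return [x[0] + x[1], x[0] * x[1]]
--     a = x[0]
--     return possible_results([a + x[1]] + x[2:]) + possible_results([a * x[1]] + x[2:])
-- ===== Notes on version B (the rewrite author's own statement) =====
-- stated objective: simpler
-- what changed: Replaces A's iterative breadth-first level expansion (a while loop doubling a list of suffix lists via pop/copy/index bookkeeping and a final flatten) by a direct recursion on the list: combine the first two elements with + and with * and recurse, concatenating the add branch before the multiply branch.
import Mathlib
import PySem

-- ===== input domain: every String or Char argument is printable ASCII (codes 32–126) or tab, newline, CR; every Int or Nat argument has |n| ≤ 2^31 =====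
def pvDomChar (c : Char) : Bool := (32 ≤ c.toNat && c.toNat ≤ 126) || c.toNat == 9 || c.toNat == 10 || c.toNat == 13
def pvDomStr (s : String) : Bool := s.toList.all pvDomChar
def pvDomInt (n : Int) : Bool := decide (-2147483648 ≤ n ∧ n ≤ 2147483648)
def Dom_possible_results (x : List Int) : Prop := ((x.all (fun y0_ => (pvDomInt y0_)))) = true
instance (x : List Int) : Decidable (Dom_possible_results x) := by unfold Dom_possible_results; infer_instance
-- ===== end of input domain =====

-- B replaces A's iterative breadth-first doubling loop by a direct recursion on the list
-- (add branch concatenated before the multiply branch); return values agree on lists of length ≥ 2.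

-- ===== PORT A =====
-- reduce_list: xx = x.copy(); a = xx.pop(0); xx2 = xx.copy(); xx[0] += a; xx2[0] *= a; return [xx, xx2]
def reduceList (x : List Int) : List (List Int) :=
  let a := PySem.List.pyGetD x 0 0            -- a = xx.pop(0)  (default unused under Pre_)
  let xx := x.drop 1
  let xx' := PySem.List.pySetD xx 0 (PySem.List.pyGetD xx 0 0 + a)
  let xx2' := PySem.List.pySetD xx 0 (PySem.List.pyGetD xx 0 0 * a)
  [xx', xx2']

-- the while loop of possible_results; fuel only makes the recursion total (Python loops until len(res[0]) == 1)
def loopA : Nat → List (List Int) → Nat → List (List Int)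
  | 0, res, _ => res
  | fuel + 1, res, i =>
    if 1 < (PySem.List.pyGetD res 0 []).length then
      -- tmp = [reduce_list(z) for z in res] inlined into the res'-building loop
      loopA fuel
        ((PySem.List.pyRange 0 (2 ^ i) 1).foldl
          (fun acc j =>
            acc ++ [PySem.List.pyGetD (PySem.List.pyGetD (res.map reduceList) j []) 0 [],
                    PySem.List.pyGetD (PySem.List.pyGetD (res.map reduceList) j []) 1 []]) [])
        (i + 1)
    else res

def possible_results (x : List Int) : List Int :=
  (loopA x.length (reduceList x) 1).flatten

-- ===== PORT B =====
def possible_results_alt (x : List Int) : List Int :=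
  match x with
  | [a, b] => [a + b, a * b]
  | a :: b :: c :: rest =>
      possible_results_alt ((a + b) :: c :: rest) ++ possible_results_alt ((a * b) :: c :: rest)
  | _ => []          -- len(x) < 2: Python raises IndexError, excluded by Pre_
termination_by x.length

-- ===== PRECONDITION & SPEC =====
-- A (and B) raise IndexError on lists of length < 2; those inputs are excluded.
def Pre_possible_results (x : List Int) : Prop := 2 ≤ x.length
instance (x : List Int) : Decidable (Pre_possible_results x) := by unfold Pre_possible_results; infer_instance
def pvWitness_possible_results : List Int := [2, 3, 5]
def Spec_possible_results (x : List Int) (out : List Int) : Prop := out = possible_results_alt x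
instance (x : List Int) (out : List Int) : Decidable (Spec_possible_results x out) := by unfold Spec_possible_results; infer_instance

-- ===== CLAIM (what is proved, stated in full; the proofs are below) =====
def Claim_equal_possible_results : Prop := ∀ (x : List Int), Dom_possible_results x → Pre_possible_results x → Spec_possible_results x (possible_results x)

-- ===== LEMMAS AND PROOFS =====

-- the contribution of one partial list to the final flattened result
def gfin (z : List Int) : List Int := if 2 ≤ z.length then possible_results_alt z else z

theorem reduceList_cons (a b : Int) (rest : List Int) :
    reduceList (a :: b :: rest) = [(b + a) :: rest, (b * a) :: rest] := by
  simp [reduceList, PySem.List.pyGetD_zero_cons, PySem.List.pySetD_of_nonneg]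

theorem reduceList_flatMap_gfin (z : List Int) (hz : 2 ≤ z.length) :
    (reduceList z).flatMap gfin = possible_results_alt z := by
  match z with
  | [a, b] =>
      rw [reduceList_cons]
      simp only [List.flatMap_cons, List.flatMap_nil, List.append_nil, gfin]
      rw [if_neg (by simp), if_neg (by simp)]
      conv_rhs => rw [possible_results_alt]
      rw [Int.add_comm b a, Int.mul_comm b a]
      rfl
  | a :: b :: c :: rest =>
      rw [reduceList_cons]
      simp only [List.flatMap_cons, List.flatMap_nil, List.append_nil, gfin]
      rw [if_pos (by simp), if_pos (by simp)]
      conv_rhs => rw [possible_results_alt]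
      rw [Int.add_comm b a, Int.mul_comm b a]

theorem flatMap_gfin_len1 (res : List (List Int)) (h : ∀ z ∈ res, z.length = 1) :
    res.flatMap gfin = res.flatten := by
  induction res with
  | nil => rfl
  | cons z rs ih =>
      have hz := h z (by simp)
      simp only [List.flatMap_cons, List.flatten_cons, gfin]
      rw [if_neg (by omega), ih (fun w hw => h w (by simp [hw]))]

theorem mem_reduceList_length (z w : List Int) (hz : 2 ≤ z.length) (hw : w ∈ reduceList z) :
    w.length = z.length - 1 := by
  match z with
  | a :: b :: rest =>
      rw [reduceList_cons] at hw
      simp at hw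
      rcases hw with h | h <;> subst h <;> simp

theorem length_flatMap_reduceList (res : List (List Int)) :
    (res.flatMap reduceList).length = 2 * res.length := by
  induction res with
  | nil => rfl
  | cons z rs ih =>
      simp only [List.flatMap_cons, List.length_append, ih, List.length_cons]
      have : (reduceList z).length = 2 := by simp [reduceList]
      omega

theorem flatMap_congr' (res : List (List Int)) (f g : List Int → List Int)
    (h : ∀ z ∈ res, f z = g z) : res.flatMap f = res.flatMap g := by
  induction res with
  | nil => rfl
  | cons z rs ih =>
      simp only [List.flatMap_cons]
      rw [h z (by simp), ih (fun w hw => h w (by simp [hw]))]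

theorem res'_eq (res : List (List Int)) (i : Nat) (hlen : res.length = 2 ^ i) :
    ((PySem.List.pyRange 0 (2 ^ i) 1).foldl
      (fun acc j =>
        acc ++ [PySem.List.pyGetD (PySem.List.pyGetD (res.map reduceList) j []) 0 [],
                PySem.List.pyGetD (PySem.List.pyGetD (res.map reduceList) j []) 1 []]) [])
    = res.flatMap reduceList := by
  have hl : ((2 : Int) ^ i) = PySem.List.len (res.map reduceList) := by
    simp [PySem.List.len_eq, hlen]
  rw [hl, PySem.List.foldl_pyRange_zero_pyGetD
        (f := fun acc (p : List (List Int)) =>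
          acc ++ [PySem.List.pyGetD p 0 [], PySem.List.pyGetD p 1 []]) (d := [])]
  rw [List.foldl_map]
  have hfun : (fun (acc : List (List Int)) (w : List Int) =>
      acc ++ [PySem.List.pyGetD (reduceList w) 0 [], PySem.List.pyGetD (reduceList w) 1 []]) =
      (fun acc w => acc ++ reduceList w) := by
    funext acc w
    unfold reduceList
    rw [PySem.List.pyGetD_zero_cons]
    norm_num [PySem.List.pyGetD_ofNat']
  rw [hfun]
  simpa using PySem.List.foldl_append_eq_flatMap (g := reduceList) (l := res)
    (acc := ([] : List (List Int)))

theorem loopA_char (fuel : Nat) : ∀ (L i : Nat) (res : List (List Int)),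
    (∀ z ∈ res, z.length = L) → 1 ≤ L → L ≤ fuel + 1 → res.length = 2 ^ i →
    (loopA fuel res i).flatten = res.flatMap gfin := by
  induction fuel with
  | zero =>
      intro L i res hall hL hLe hlen
      have hL1 : L = 1 := by omega
      subst hL1
      rw [loopA, flatMap_gfin_len1 res hall]
  | succ fuel ih =>
      intro L i res hall hL hLe hlen
      have hne : res ≠ [] := by
        intro h; subst h; simp at hlen
        exact absurd hlen.symm (by positivity)
      by_cases hL2 : 2 ≤ L
      · -- loop body runs
        obtain ⟨z0, rs, rfl⟩ := List.exists_cons_of_ne_nil hne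
        have hhead : (PySem.List.pyGetD (z0 :: rs) 0 []).length = L := by
          rw [PySem.List.pyGetD_zero_cons]; exact hall z0 (by simp)
        rw [loopA, if_pos (by rw [hhead]; omega)]
        rw [res'_eq (z0 :: rs) i hlen]
        rw [ih (L - 1) (i + 1) _
          (fun w hw => by
            obtain ⟨z, hz, hwz⟩ := List.mem_flatMap.mp hw
            rw [mem_reduceList_length z w (by rw [hall z hz]; omega) hwz, hall z hz])
          (by omega) (by omega)
          (by rw [length_flatMap_reduceList, hlen]; ring)]
        rw [List.flatMap_assoc]
        exact flatMap_congr' _ _ _ (fun z hz => by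
          have h2 : 2 ≤ z.length := by rw [hall z hz]; omega
          rw [reduceList_flatMap_gfin z h2]
          unfold gfin
          rw [if_pos h2])
      · -- all lists already length 1: loop exits immediately
        have hL1 : L = 1 := by omega
        subst hL1
        obtain ⟨z0, rs, rfl⟩ := List.exists_cons_of_ne_nil hne
        have hhead : (PySem.List.pyGetD (z0 :: rs) 0 []).length = 1 := by
          rw [PySem.List.pyGetD_zero_cons]; exact hall z0 (by simp)
        rw [loopA, if_neg (by rw [hhead]; omega)]
        exact (flatMap_gfin_len1 _ hall).symm

-- ===== VERDICT (by name: the statement is the Claim_ definition above) =====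
theorem possible_results_spec : Claim_equal_possible_results := by
  intro x _hdom hpre
  unfold Spec_possible_results possible_results
  have hx : 2 ≤ x.length := hpre
  rw [loopA_char x.length (x.length - 1) 1 (reduceList x)
    (fun w hw => mem_reduceList_length x w hx hw)
    (by omega) (by omega)
    (by simp [reduceList])]
  rw [reduceList_flatMap_gfin x hx]
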